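-- pv_equiv track=rewrite | github.com/FishRom/school | krylov_v18/12.py | f
-- ===== SOURCE A (Python) =====
-- def f(k):
--     n = '>' + '0' * 15 + '1' * k + '2' * 15
--     while '>0' in n or '>1' in n or '>2' in n:
--         if '>0' in n:
--             n = n.replace('>0', '22>', 1)
--         if '>1' in n:
--             n = n.replace('>1', '2>', 1)
--         if '>2' in n:
--             n = n.replace('>2', '1>', 1)
--     return n.replace('>', '')
-- ===== SOURCE B (Python) =====
-- def f(k):
--     # Closed form: the head turns each of the 15 '0's into two '2's, each of the
--     # k '1's into one '2', and walks through the 15 '2's turning them into '1's.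
--     return '2' * (30 + max(k, 0)) + '1' * 15
-- ===== Notes on version B (the rewrite author's own statement) =====
-- stated objective: faster
-- what changed: Replaced the quadratic string-rewriting simulation of the Turing-machine tape by the closed-form result string '2'*(30+max(k,0)) + '1'*15.
import Mathlib
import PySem

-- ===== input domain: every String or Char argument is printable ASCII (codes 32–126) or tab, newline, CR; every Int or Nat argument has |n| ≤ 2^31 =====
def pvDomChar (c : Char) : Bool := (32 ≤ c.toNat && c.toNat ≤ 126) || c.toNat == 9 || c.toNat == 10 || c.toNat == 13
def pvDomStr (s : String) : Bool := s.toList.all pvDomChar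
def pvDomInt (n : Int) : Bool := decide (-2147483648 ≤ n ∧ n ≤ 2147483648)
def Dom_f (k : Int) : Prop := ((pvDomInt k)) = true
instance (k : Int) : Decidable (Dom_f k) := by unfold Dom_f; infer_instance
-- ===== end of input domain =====

-- B replaces A's quadratic tape-rewriting loop by the closed-form result string (faster, asymptotic).

-- ===== PORT A =====
-- s.replace(old, new, 1): replace the FIRST occurrence of old; exact for nonempty old
-- (all patterns A uses are nonempty literals).
def replace1 (s old new : List Char) : List Char :=
  let i := PySem.Chars.find s old
  if i = -1 then s else s.take i.toNat ++ new ++ s.drop (i.toNat + old.length)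

-- one execution of the while-loop's body (the three successive conditional replaces)
def bodyA (n : List Char) : List Char :=
  let n1 := if PySem.Chars.isIn ['>', '0'] n then replace1 n ['>', '0'] ['2', '2', '>'] else n
  let n2 := if PySem.Chars.isIn ['>', '1'] n1 then replace1 n1 ['>', '1'] ['2', '>'] else n1
  if PySem.Chars.isIn ['>', '2'] n2 then replace1 n2 ['>', '2'] ['1', '>'] else n2

-- the while loop; the fuel only makes the recursion total (k.toNat + 46 iterations
-- always suffice: each iteration consumes at least one of the 30 + k rewritable cells)
def loopA : Nat → List Char → List Char
  | 0, n => n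
  | fuel + 1, n =>
      if PySem.Chars.isIn ['>', '0'] n || PySem.Chars.isIn ['>', '1'] n
          || PySem.Chars.isIn ['>', '2'] n then
        loopA fuel (bodyA n)
      else n

def f (k : Int) : String :=
  let n := ['>'] ++ List.replicate 15 '0' ++ List.replicate k.toNat '1' ++ List.replicate 15 '2'
  String.mk (PySem.Chars.replace (loopA (k.toNat + 46) n) ['>'] [])

-- ===== PORT B =====
def f_alt (k : Int) : String :=
  String.mk (List.replicate (30 + max k 0).toNat '2' ++ List.replicate 15 '1')

-- ===== PRECONDITION & SPEC =====
def Spec_f (k : Int) (out : String) : Prop := out = f_alt k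
instance (k : Int) (out : String) : Decidable (Spec_f k out) := by unfold Spec_f; infer_instance

-- ===== CLAIM (what is proved, stated in full; the proofs are below) =====
def Claim_equal_f : Prop := ∀ (k : Int), Dom_f k → Spec_f k (f k)

-- ===== LEMMAS AND PROOFS =====

-- the separator '>' occurs exactly once: splitting at it is unambiguous
theorem append_cons_sep (c : Char) : ∀ (u s v w : List Char),
    c ∉ u → c ∉ s → u ++ c :: v = s ++ c :: w → u = s ∧ v = w := by
  intro u
  induction u with
  | nil =>
      intro s v w _ hs h
      cases s with
      | nil => simpa using h
      | cons b s' =>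
          simp only [List.nil_append, List.cons_append, List.cons.injEq] at h
          exact absurd (h.1 ▸ List.mem_cons_self) hs
  | cons a u' ih =>
      intro s v w hu hs h
      cases s with
      | nil =>
          simp only [List.cons_append, List.nil_append, List.cons.injEq] at h
          exact absurd (h.1 ▸ List.mem_cons_self) hu
      | cons b s' =>
          simp only [List.cons_append, List.cons.injEq] at h
          obtain ⟨rfl, h2⟩ := h
          have := ih s' v w (fun hm => hu (List.mem_cons_of_mem _ hm))
            (fun hm => hs (List.mem_cons_of_mem _ hm)) h2
          exact ⟨by rw [this.1], this.2⟩

theorem isIn_sep_true (u v : List Char) (x : Char) :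
    PySem.Chars.isIn ['>', x] (u ++ '>' :: x :: v) = true := by
  rw [PySem.Chars.isIn_iff_infix]
  exact ⟨u, v, by simp⟩

theorem isIn_sep_false (u v : List Char) (x : Char) (hx : x ≠ '>')
    (hu : '>' ∉ u) (hv : '>' ∉ v) (hhead : v.head? ≠ some x) :
    PySem.Chars.isIn ['>', x] (u ++ '>' :: v) = false := by
  rw [PySem.Chars.isIn_eq_false_iff]
  rintro ⟨p, q, h⟩
  have h' : p ++ '>' :: (x :: q) = u ++ '>' :: v := by simpa using h
  have hcount := congrArg (List.count '>') h'
  have hcu : List.count '>' u = 0 := List.count_eq_zero.mpr hu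
  have hcv : List.count '>' v = 0 := List.count_eq_zero.mpr hv
  simp [hx, hcu, hcv] at hcount
  have hp : '>' ∉ p := List.count_eq_zero.mp (by omega)
  obtain ⟨hpu, hvq⟩ := append_cons_sep '>' p u (x :: q) v hp hu h'
  rw [← hvq] at hhead
  simp at hhead

theorem isIn_sep (u v : List Char) (x : Char) (hx : x ≠ '>')
    (hu : '>' ∉ u) (hv : '>' ∉ v) :
    PySem.Chars.isIn ['>', x] (u ++ '>' :: v) = decide (v.head? = some x) := by
  cases v with
  | nil =>
      rw [isIn_sep_false u [] x hx hu (by simp) (by simp)]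
      simp
  | cons c w =>
      by_cases hc : c = x
      · subst hc
        rw [isIn_sep_true u w c]
        simp
      · rw [isIn_sep_false u (c :: w) x hx hu hv (by simp [hc])]
        simp [hc]

theorem guard_sep (u v : List Char) (hu : '>' ∉ u) (hv : '>' ∉ v) :
    (PySem.Chars.isIn ['>', '0'] (u ++ '>' :: v) || PySem.Chars.isIn ['>', '1'] (u ++ '>' :: v)
        || PySem.Chars.isIn ['>', '2'] (u ++ '>' :: v))
      = (decide (v.head? = some '0') || decide (v.head? = some '1')
        || decide (v.head? = some '2')) := by
  rw [isIn_sep u v '0' (by decide) hu hv, isIn_sep u v '1' (by decide) hu hv,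
    isIn_sep u v '2' (by decide) hu hv]

theorem find_sep (u v : List Char) (x : Char) (hu : '>' ∉ u) :
    PySem.Chars.find (u ++ '>' :: x :: v) ['>', x] = (u.length : Int) := by
  have hinf : ['>', x] <:+: u ++ '>' :: x :: v := ⟨u, v, by simp⟩
  have h0 : 0 ≤ PySem.Chars.find (u ++ '>' :: x :: v) ['>', x] :=
    (PySem.Chars.find_nonneg_iff _ _).mpr hinf
  obtain ⟨hpre, hmin⟩ := PySem.Chars.find_spec h0
  have hatu : ['>', x] <+: (u ++ '>' :: x :: v).drop u.length := by
    rw [List.drop_left]; exact ⟨v, rfl⟩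
  have hne : (PySem.Chars.find (u ++ '>' :: x :: v) ['>', x]).toNat = u.length := by
    rcases Nat.lt_trichotomy (PySem.Chars.find (u ++ '>' :: x :: v) ['>', x]).toNat u.length
      with h | h | h
    · exfalso
      have hdrop : (u ++ '>' :: x :: v).drop (PySem.Chars.find (u ++ '>' :: x :: v) ['>', x]).toNat
          = u.drop (PySem.Chars.find (u ++ '>' :: x :: v) ['>', x]).toNat ++ '>' :: x :: v := by
        rw [List.drop_append_of_le_length (Nat.le_of_lt h)]
      rcases hpre with ⟨t, ht⟩
      rw [hdrop] at ht
      obtain ⟨a, rest, hrest⟩ : ∃ a rest,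
          u.drop (PySem.Chars.find (u ++ '>' :: x :: v) ['>', x]).toNat = a :: rest := by
        cases hcase : u.drop (PySem.Chars.find (u ++ '>' :: x :: v) ['>', x]).toNat with
        | nil => exfalso; have := List.drop_eq_nil_iff.mp hcase; omega
        | cons a rest => exact ⟨a, rest, rfl⟩
      rw [hrest] at ht
      simp only [List.cons_append, List.cons.injEq] at ht
      have ha : a ∈ u := by
        have : a ∈ u.drop (PySem.Chars.find (u ++ '>' :: x :: v) ['>', x]).toNat := by
          rw [hrest]; exact List.mem_cons_self
        exact List.mem_of_mem_drop this
      exact hu (ht.1 ▸ ha)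
    · exact h
    · exact absurd hatu (hmin u.length h)
  omega

theorem replace1_sep (u v rep : List Char) (x : Char) (hu : '>' ∉ u) :
    replace1 (u ++ '>' :: x :: v) ['>', x] rep = u ++ rep ++ v := by
  unfold replace1
  rw [find_sep u v x hu]
  have hne : ¬ ((u.length : Int) = -1) := by omega
  rw [if_neg hne]
  have h1 : ((u.length : Int)).toNat = u.length := by omega
  rw [h1, List.take_left]
  congr 1
  have hassoc : u ++ '>' :: x :: v = (u ++ ['>', x]) ++ v := by simp
  rw [hassoc]
  rw [show u.length + (['>', x] : List Char).length = (u ++ ['>', x]).length from by simp]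
  rw [List.drop_left]

-- '>' is not a tape symbol
theorem not_mem_rep (n : Nat) (c : Char) (h : c ≠ '>') : '>' ∉ List.replicate n c := by
  simp [List.mem_replicate]; intro _ hc; exact h hc.symm

theorem gt_nmem_cons {c : Char} {w : List Char} (hc : c ≠ '>') (hw : '>' ∉ w) :
    '>' ∉ c :: w := by
  intro h
  rcases List.mem_cons.mp h with h | h
  exacts [hc h.symm, hw h]

theorem gt_nmem_append {u v : List Char} (h1 : '>' ∉ u) (h2 : '>' ∉ v) :
    '>' ∉ u ++ v := by
  intro h
  rcases List.mem_append.mp h with h | h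
  exacts [h1 h, h2 h]

-- the three conditional replaces of the loop body, characterised on the split tape
theorem stage0 (u v : List Char) (hu : '>' ∉ u) (hv : '>' ∉ v) :
    (if PySem.Chars.isIn ['>', '0'] (u ++ '>' :: v) = true
      then replace1 (u ++ '>' :: v) ['>', '0'] ['2', '2', '>'] else u ++ '>' :: v)
    = (if v.head? = some '0' then u ++ ['2', '2'] else u) ++ '>' ::
      (if v.head? = some '0' then v.tail else v) := by
  cases v with
  | nil =>
      rw [isIn_sep u [] '0' (by decide) hu (by simp)]
      simp
  | cons c w =>
      by_cases hc : c = '0'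
      · subst hc
        rw [if_pos (isIn_sep_true u w '0'), replace1_sep u w ['2', '2', '>'] '0' hu]
        simp
      · have hfalse := isIn_sep_false u (c :: w) '0' (by decide) hu hv (by simp [hc])
        simp [hfalse, hc]

theorem stage1 (u v : List Char) (hu : '>' ∉ u) (hv : '>' ∉ v) :
    (if PySem.Chars.isIn ['>', '1'] (u ++ '>' :: v) = true
      then replace1 (u ++ '>' :: v) ['>', '1'] ['2', '>'] else u ++ '>' :: v)
    = (if v.head? = some '1' then u ++ ['2'] else u) ++ '>' ::
      (if v.head? = some '1' then v.tail else v) := by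
  cases v with
  | nil =>
      rw [isIn_sep u [] '1' (by decide) hu (by simp)]
      simp
  | cons c w =>
      by_cases hc : c = '1'
      · subst hc
        rw [if_pos (isIn_sep_true u w '1'), replace1_sep u w ['2', '>'] '1' hu]
        simp
      · have hfalse := isIn_sep_false u (c :: w) '1' (by decide) hu hv (by simp [hc])
        simp [hfalse, hc]

theorem stage2 (u v : List Char) (hu : '>' ∉ u) (hv : '>' ∉ v) :
    (if PySem.Chars.isIn ['>', '2'] (u ++ '>' :: v) = true
      then replace1 (u ++ '>' :: v) ['>', '2'] ['1', '>'] else u ++ '>' :: v)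
    = (if v.head? = some '2' then u ++ ['1'] else u) ++ '>' ::
      (if v.head? = some '2' then v.tail else v) := by
  cases v with
  | nil =>
      rw [isIn_sep u [] '2' (by decide) hu (by simp)]
      simp
  | cons c w =>
      by_cases hc : c = '2'
      · subst hc
        rw [if_pos (isIn_sep_true u w '2'), replace1_sep u w ['1', '>'] '2' hu]
        simp
      · have hfalse := isIn_sep_false u (c :: w) '2' (by decide) hu hv (by simp [hc])
        simp [hfalse, hc]

theorem loopA_succ (fuel : Nat) (n : List Char) :
    loopA (fuel + 1) n
      = if (PySem.Chars.isIn ['>', '0'] n || PySem.Chars.isIn ['>', '1'] n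
          || PySem.Chars.isIn ['>', '2'] n) = true then loopA fuel (bodyA n) else n := rfl

theorem loopA_end (fuel : Nat) (u : List Char) (hu : '>' ∉ u) :
    loopA fuel (u ++ ['>']) = u ++ ['>'] := by
  cases fuel with
  | zero => rfl
  | succ fu =>
      have h : ¬ ((PySem.Chars.isIn ['>', '0'] (u ++ '>' :: []) || PySem.Chars.isIn ['>', '1'] (u ++ '>' :: [])
          || PySem.Chars.isIn ['>', '2'] (u ++ '>' :: [])) = true) := by
        rw [guard_sep u [] hu (by simp)]; simp
      rw [loopA_succ, if_neg h]

-- the loop body on each reachable tape shape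
theorem body2 (u t : List Char) (hu : '>' ∉ u) (ht : '>' ∉ t) :
    bodyA (u ++ '>' :: '2' :: t) = (u ++ ['1']) ++ '>' :: t := by
  have hv : '>' ∉ ('2' :: t : List Char) := gt_nmem_cons (by decide) ht
  have n0 : ¬ (('2' :: t : List Char).head? = some '0') := by simp
  have n1 : ¬ (('2' :: t : List Char).head? = some '1') := by simp
  have y2 : (('2' :: t : List Char).head? = some '2') := rfl
  simp only [bodyA]
  rw [stage0 u ('2' :: t) hu hv, if_neg n0, if_neg n0]
  rw [stage1 u ('2' :: t) hu hv, if_neg n1, if_neg n1]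
  rw [stage2 u ('2' :: t) hu hv, if_pos y2, if_pos y2, List.tail_cons]

theorem body1_1 (u t : List Char) (hu : '>' ∉ u) (ht : '>' ∉ t) :
    bodyA (u ++ '>' :: '1' :: '1' :: t) = (u ++ ['2']) ++ '>' :: '1' :: t := by
  have hv : '>' ∉ ('1' :: '1' :: t : List Char) :=
    gt_nmem_cons (by decide) (gt_nmem_cons (by decide) ht)
  have hv1 : '>' ∉ ('1' :: t : List Char) := gt_nmem_cons (by decide) ht
  have hu1 : '>' ∉ u ++ ['2'] := gt_nmem_append hu (by decide)
  have n0 : ¬ (('1' :: '1' :: t : List Char).head? = some '0') := by simp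
  have y1 : (('1' :: '1' :: t : List Char).head? = some '1') := rfl
  have n2 : ¬ (('1' :: t : List Char).head? = some '2') := by simp
  simp only [bodyA]
  rw [stage0 u ('1' :: '1' :: t) hu hv, if_neg n0, if_neg n0]
  rw [stage1 u ('1' :: '1' :: t) hu hv, if_pos y1, if_pos y1, List.tail_cons]
  rw [stage2 (u ++ ['2']) ('1' :: t) hu1 hv1, if_neg n2, if_neg n2]

theorem body1_2 (u t : List Char) (hu : '>' ∉ u) (ht : '>' ∉ t) :
    bodyA (u ++ '>' :: '1' :: '2' :: t) = (u ++ ['2', '1']) ++ '>' :: t := by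
  have hv : '>' ∉ ('1' :: '2' :: t : List Char) :=
    gt_nmem_cons (by decide) (gt_nmem_cons (by decide) ht)
  have hv1 : '>' ∉ ('2' :: t : List Char) := gt_nmem_cons (by decide) ht
  have hu1 : '>' ∉ u ++ ['2'] := gt_nmem_append hu (by decide)
  have n0 : ¬ (('1' :: '2' :: t : List Char).head? = some '0') := by simp
  have y1 : (('1' :: '2' :: t : List Char).head? = some '1') := rfl
  have y2 : (('2' :: t : List Char).head? = some '2') := rfl
  simp only [bodyA]
  rw [stage0 u ('1' :: '2' :: t) hu hv, if_neg n0, if_neg n0]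
  rw [stage1 u ('1' :: '2' :: t) hu hv, if_pos y1, if_pos y1, List.tail_cons]
  rw [stage2 (u ++ ['2']) ('2' :: t) hu1 hv1, if_pos y2, if_pos y2, List.tail_cons]
  simp

theorem body1_nil (u : List Char) (hu : '>' ∉ u) :
    bodyA (u ++ '>' :: ['1']) = (u ++ ['2']) ++ '>' :: [] := by
  have hv : '>' ∉ (['1'] : List Char) := by decide
  have hu1 : '>' ∉ u ++ ['2'] := gt_nmem_append hu (by decide)
  have n0 : ¬ ((['1'] : List Char).head? = some '0') := by simp
  have y1 : ((['1'] : List Char).head? = some '1') := rfl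
  have n2 : ¬ (([] : List Char).head? = some '2') := by simp
  simp only [bodyA]
  rw [stage0 u ['1'] hu hv, if_neg n0, if_neg n0]
  rw [stage1 u ['1'] hu hv, if_pos y1, if_pos y1, List.tail_cons]
  rw [stage2 (u ++ ['2']) [] hu1 (by simp), if_neg n2, if_neg n2]

theorem body0_0 (u t : List Char) (hu : '>' ∉ u) (ht : '>' ∉ t) :
    bodyA (u ++ '>' :: '0' :: '0' :: t) = (u ++ ['2', '2']) ++ '>' :: '0' :: t := by
  have hv : '>' ∉ ('0' :: '0' :: t : List Char) :=
    gt_nmem_cons (by decide) (gt_nmem_cons (by decide) ht)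
  have hv1 : '>' ∉ ('0' :: t : List Char) := gt_nmem_cons (by decide) ht
  have hu1 : '>' ∉ u ++ ['2', '2'] := gt_nmem_append hu (by decide)
  have y0 : (('0' :: '0' :: t : List Char).head? = some '0') := rfl
  have n1 : ¬ (('0' :: t : List Char).head? = some '1') := by simp
  have n2 : ¬ (('0' :: t : List Char).head? = some '2') := by simp
  simp only [bodyA]
  rw [stage0 u ('0' :: '0' :: t) hu hv, if_pos y0, if_pos y0, List.tail_cons]
  rw [stage1 (u ++ ['2', '2']) ('0' :: t) hu1 hv1, if_neg n1, if_neg n1]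
  rw [stage2 (u ++ ['2', '2']) ('0' :: t) hu1 hv1, if_neg n2, if_neg n2]

theorem body0_nil (u : List Char) (hu : '>' ∉ u) :
    bodyA (u ++ '>' :: ['0']) = (u ++ ['2', '2']) ++ '>' :: [] := by
  have hv : '>' ∉ (['0'] : List Char) := by decide
  have hu1 : '>' ∉ u ++ ['2', '2'] := gt_nmem_append hu (by decide)
  have y0 : ((['0'] : List Char).head? = some '0') := rfl
  have n1 : ¬ (([] : List Char).head? = some '1') := by simp
  have n2 : ¬ (([] : List Char).head? = some '2') := by simp
  simp only [bodyA]
  rw [stage0 u ['0'] hu hv, if_pos y0, if_pos y0, List.tail_cons]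
  rw [stage1 (u ++ ['2', '2']) [] hu1 (by simp), if_neg n1, if_neg n1]
  rw [stage2 (u ++ ['2', '2']) [] hu1 (by simp), if_neg n2, if_neg n2]

theorem body0_2 (u t : List Char) (hu : '>' ∉ u) (ht : '>' ∉ t) :
    bodyA (u ++ '>' :: '0' :: '2' :: t) = (u ++ ['2', '2', '1']) ++ '>' :: t := by
  have hv : '>' ∉ ('0' :: '2' :: t : List Char) :=
    gt_nmem_cons (by decide) (gt_nmem_cons (by decide) ht)
  have hv1 : '>' ∉ ('2' :: t : List Char) := gt_nmem_cons (by decide) ht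
  have hu1 : '>' ∉ u ++ ['2', '2'] := gt_nmem_append hu (by decide)
  have y0 : (('0' :: '2' :: t : List Char).head? = some '0') := rfl
  have n1 : ¬ (('2' :: t : List Char).head? = some '1') := by simp
  have y2 : (('2' :: t : List Char).head? = some '2') := rfl
  simp only [bodyA]
  rw [stage0 u ('0' :: '2' :: t) hu hv, if_pos y0, if_pos y0, List.tail_cons]
  rw [stage1 (u ++ ['2', '2']) ('2' :: t) hu1 hv1, if_neg n1, if_neg n1]
  rw [stage2 (u ++ ['2', '2']) ('2' :: t) hu1 hv1, if_pos y2, if_pos y2, List.tail_cons]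
  simp

theorem body0_1_1 (u t : List Char) (hu : '>' ∉ u) (ht : '>' ∉ t) :
    bodyA (u ++ '>' :: '0' :: '1' :: '1' :: t) = (u ++ ['2', '2', '2']) ++ '>' :: '1' :: t := by
  have hv : '>' ∉ ('0' :: '1' :: '1' :: t : List Char) :=
    gt_nmem_cons (by decide) (gt_nmem_cons (by decide) (gt_nmem_cons (by decide) ht))
  have hv1 : '>' ∉ ('1' :: '1' :: t : List Char) :=
    gt_nmem_cons (by decide) (gt_nmem_cons (by decide) ht)
  have hv2 : '>' ∉ ('1' :: t : List Char) := gt_nmem_cons (by decide) ht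
  have hu1 : '>' ∉ u ++ ['2', '2'] := gt_nmem_append hu (by decide)
  have hu2 : '>' ∉ (u ++ ['2', '2']) ++ ['2'] := gt_nmem_append hu1 (by decide)
  have y0 : (('0' :: '1' :: '1' :: t : List Char).head? = some '0') := rfl
  have y1 : (('1' :: '1' :: t : List Char).head? = some '1') := rfl
  have n2 : ¬ (('1' :: t : List Char).head? = some '2') := by simp
  simp only [bodyA]
  rw [stage0 u ('0' :: '1' :: '1' :: t) hu hv, if_pos y0, if_pos y0, List.tail_cons]
  rw [stage1 (u ++ ['2', '2']) ('1' :: '1' :: t) hu1 hv1, if_pos y1, if_pos y1, List.tail_cons]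
  rw [stage2 ((u ++ ['2', '2']) ++ ['2']) ('1' :: t) hu2 hv2, if_neg n2, if_neg n2]
  simp

theorem body0_1_2 (u t : List Char) (hu : '>' ∉ u) (ht : '>' ∉ t) :
    bodyA (u ++ '>' :: '0' :: '1' :: '2' :: t) = (u ++ ['2', '2', '2', '1']) ++ '>' :: t := by
  have hv : '>' ∉ ('0' :: '1' :: '2' :: t : List Char) :=
    gt_nmem_cons (by decide) (gt_nmem_cons (by decide) (gt_nmem_cons (by decide) ht))
  have hv1 : '>' ∉ ('1' :: '2' :: t : List Char) :=
    gt_nmem_cons (by decide) (gt_nmem_cons (by decide) ht)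
  have hv2 : '>' ∉ ('2' :: t : List Char) := gt_nmem_cons (by decide) ht
  have hu1 : '>' ∉ u ++ ['2', '2'] := gt_nmem_append hu (by decide)
  have hu2 : '>' ∉ (u ++ ['2', '2']) ++ ['2'] := gt_nmem_append hu1 (by decide)
  have y0 : (('0' :: '1' :: '2' :: t : List Char).head? = some '0') := rfl
  have y1 : (('1' :: '2' :: t : List Char).head? = some '1') := rfl
  have y2 : (('2' :: t : List Char).head? = some '2') := rfl
  simp only [bodyA]
  rw [stage0 u ('0' :: '1' :: '2' :: t) hu hv, if_pos y0, if_pos y0, List.tail_cons]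
  rw [stage1 (u ++ ['2', '2']) ('1' :: '2' :: t) hu1 hv1, if_pos y1, if_pos y1, List.tail_cons]
  rw [stage2 ((u ++ ['2', '2']) ++ ['2']) ('2' :: t) hu2 hv2, if_pos y2, if_pos y2, List.tail_cons]
  simp

theorem body0_1_nil (u : List Char) (hu : '>' ∉ u) :
    bodyA (u ++ '>' :: ['0', '1']) = (u ++ ['2', '2', '2']) ++ '>' :: [] := by
  have hv : '>' ∉ (['0', '1'] : List Char) := by decide
  have hv1 : '>' ∉ (['1'] : List Char) := by decide
  have hu1 : '>' ∉ u ++ ['2', '2'] := gt_nmem_append hu (by decide)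
  have hu2 : '>' ∉ (u ++ ['2', '2']) ++ ['2'] := gt_nmem_append hu1 (by decide)
  have y0 : ((['0', '1'] : List Char).head? = some '0') := rfl
  have y1 : ((['1'] : List Char).head? = some '1') := rfl
  have n2 : ¬ (([] : List Char).head? = some '2') := by simp
  simp only [bodyA]
  rw [stage0 u ['0', '1'] hu hv, if_pos y0, if_pos y0, List.tail_cons]
  rw [stage1 (u ++ ['2', '2']) ['1'] hu1 hv1, if_pos y1, if_pos y1, List.tail_cons]
  rw [stage2 ((u ++ ['2', '2']) ++ ['2']) [] hu2 (by simp), if_neg n2, if_neg n2]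
  simp

-- membership facts for the canonical tape pieces
theorem nm2 (n : Nat) : '>' ∉ List.replicate n '2' := not_mem_rep n '2' (by decide)
theorem nm1 (n : Nat) : '>' ∉ List.replicate n '1' := not_mem_rep n '1' (by decide)
theorem nm0 (n : Nat) : '>' ∉ List.replicate n '0' := not_mem_rep n '0' (by decide)

-- phase 3: the head walks right through the remaining '2's, leaving '1's behind
theorem loopA_phase3 : ∀ (d a e fuel : Nat), d ≤ fuel →
    loopA fuel ((List.replicate a '2' ++ List.replicate e '1') ++ '>' :: List.replicate d '2')
      = (List.replicate a '2' ++ List.replicate (e + d) '1') ++ ['>'] := by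
  intro d
  induction d with
  | zero =>
      intro a e fuel _
      have h1 : (List.replicate 0 '2' : List Char) = [] := rfl
      rw [h1, loopA_end fuel _ (gt_nmem_append (nm2 a) (nm1 e)), Nat.add_zero]
  | succ d ih =>
      intro a e fuel hf
      cases fuel with
      | zero => omega
      | succ fu =>
          have hu : '>' ∉ List.replicate a '2' ++ List.replicate e '1' :=
            gt_nmem_append (nm2 a) (nm1 e)
          have hv : '>' ∉ ('2' :: List.replicate d '2' : List Char) :=
            gt_nmem_cons (by decide) (nm2 d)
          have hsp : (List.replicate (d + 1) '2' : List Char) = '2' :: List.replicate d '2' := by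
            simp [List.replicate_succ]
          rw [hsp, loopA_succ, if_pos (by rw [guard_sep _ _ hu hv]; simp),
            body2 _ _ hu (nm2 d)]
          have hst : ((List.replicate a '2' ++ List.replicate e '1') ++ ['1'])
              = List.replicate a '2' ++ List.replicate (e + 1) '1' := by
            simp [List.replicate_succ']
          rw [hst, ih a (e + 1) fu (by omega)]
          have : e + 1 + d = e + (d + 1) := by omega
          rw [this]

-- phase 2: the head consumes the '1's, writing a '2' for each
theorem loopA_phase2 : ∀ (c a d fuel : Nat), c + d ≤ fuel →
    loopA fuel (List.replicate a '2' ++ '>' :: (List.replicate c '1' ++ List.replicate d '2'))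
      = (List.replicate (a + c) '2' ++ List.replicate d '1') ++ ['>'] := by
  intro c
  induction c with
  | zero =>
      intro a d fuel hf
      have hst : List.replicate a '2' ++ '>' :: (List.replicate 0 '1' ++ List.replicate d '2')
          = (List.replicate a '2' ++ List.replicate 0 '1') ++ '>' :: List.replicate d '2' := by
        simp
      rw [hst, loopA_phase3 d a 0 fuel (by omega)]
      simp
  | succ c ih =>
      intro a d fuel hf
      cases fuel with
      | zero => omega
      | succ fu =>
          have hu : '>' ∉ List.replicate a '2' := nm2 a
          have hsp : (List.replicate (c + 1) '1' ++ List.replicate d '2' : List Char)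
              = '1' :: (List.replicate c '1' ++ List.replicate d '2') := by
            simp [List.replicate_succ]
          have hv : '>' ∉ ('1' :: (List.replicate c '1' ++ List.replicate d '2') : List Char) :=
            gt_nmem_cons (by decide) (gt_nmem_append (nm1 c) (nm2 d))
          rw [hsp, loopA_succ, if_pos (by rw [guard_sep _ _ hu hv]; simp)]
          cases c with
          | zero =>
              cases d with
              | zero =>
                  rw [show (List.replicate 0 '1' ++ List.replicate 0 '2' : List Char) = []
                    from rfl]
                  rw [body1_nil _ hu]
                  have h2 : (List.replicate a '2' ++ ['2'] : List Char) ++ '>' :: []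
                      = (List.replicate a '2' ++ ['2']) ++ ['>'] := rfl
                  rw [h2, loopA_end fu _ (gt_nmem_append hu (by decide))]
                  simp [List.replicate_succ']
              | succ d' =>
                  rw [show (List.replicate 0 '1' ++ List.replicate (d' + 1) '2' : List Char)
                      = '2' :: List.replicate d' '2' by simp [List.replicate_succ]]
                  rw [body1_2 _ _ hu (nm2 d')]
                  have hst : (List.replicate a '2' ++ ['2', '1'] : List Char)
                      = List.replicate (a + 1) '2' ++ List.replicate 1 '1' := by
                    simp [List.replicate_succ']
                  rw [hst, loopA_phase3 d' (a + 1) 1 fu (by omega)]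
                  rw [show (1 + d' : Nat) = d' + 1 from by omega,
                    show (a + (0 + 1) : Nat) = a + 1 from by omega]
          | succ c' =>
              rw [show (List.replicate (c' + 1) '1' ++ List.replicate d '2' : List Char)
                  = '1' :: (List.replicate c' '1' ++ List.replicate d '2')
                  by simp [List.replicate_succ]]
              rw [body1_1 _ _ hu (gt_nmem_append (nm1 c') (nm2 d))]
              rw [show (List.replicate a '2' ++ ['2'] : List Char) = List.replicate (a + 1) '2'
                from by simp [List.replicate_succ']]
              rw [show ('1' :: (List.replicate c' '1' ++ List.replicate d '2') : List Char)
                  = List.replicate (c' + 1) '1' ++ List.replicate d '2'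
                  from by simp [List.replicate_succ]]
              rw [ih (a + 1) d fu (by omega)]
              rw [show (a + 1 + (c' + 1) : Nat) = a + (c' + 1 + 1) from by omega]

-- phase 1: the head consumes the '0's, writing two '2's for each
theorem loopA_phase1 : ∀ (b a c d fuel : Nat), b + c + d + 2 ≤ fuel →
    loopA fuel (List.replicate a '2' ++ '>' ::
        (List.replicate b '0' ++ List.replicate c '1' ++ List.replicate d '2'))
      = (List.replicate (a + 2 * b + c) '2' ++ List.replicate d '1') ++ ['>'] := by
  intro b
  induction b with
  | zero =>
      intro a c d fuel hf
      rw [show (List.replicate 0 '0' ++ List.replicate c '1' ++ List.replicate d '2' : List Char)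
          = List.replicate c '1' ++ List.replicate d '2' from by simp]
      rw [loopA_phase2 c a d fuel (by omega)]
      rw [show (a + 2 * 0 + c : Nat) = a + c from by omega]
  | succ b ih =>
      intro a c d fuel hf
      cases fuel with
      | zero => omega
      | succ fu =>
          have hu : '>' ∉ List.replicate a '2' := nm2 a
          have hsp : (List.replicate (b + 1) '0' ++ List.replicate c '1'
                ++ List.replicate d '2' : List Char)
              = '0' :: (List.replicate b '0' ++ List.replicate c '1'
                ++ List.replicate d '2') := by
            simp [List.replicate_succ]
          have htail : '>' ∉ (List.replicate b '0' ++ List.replicate c '1'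
              ++ List.replicate d '2' : List Char) :=
            gt_nmem_append (gt_nmem_append (nm0 b) (nm1 c)) (nm2 d)
          have hv : '>' ∉ ('0' :: (List.replicate b '0' ++ List.replicate c '1'
              ++ List.replicate d '2') : List Char) := gt_nmem_cons (by decide) htail
          rw [hsp, loopA_succ, if_pos (by rw [guard_sep _ _ hu hv]; simp)]
          cases b with
          | succ b' =>
              rw [show (List.replicate (b' + 1) '0' ++ List.replicate c '1'
                    ++ List.replicate d '2' : List Char)
                  = '0' :: (List.replicate b' '0' ++ List.replicate c '1'
                    ++ List.replicate d '2') from by simp [List.replicate_succ]]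
              rw [body0_0 _ _ hu
                (gt_nmem_append (gt_nmem_append (nm0 b') (nm1 c)) (nm2 d))]
              rw [show (List.replicate a '2' ++ ['2', '2'] : List Char)
                  = List.replicate (a + 2) '2' from by simp [List.replicate_succ']]
              rw [show ('0' :: (List.replicate b' '0' ++ List.replicate c '1'
                    ++ List.replicate d '2') : List Char)
                  = List.replicate (b' + 1) '0' ++ List.replicate c '1'
                    ++ List.replicate d '2' from by simp [List.replicate_succ]]
              rw [ih (a + 2) c d fu (by omega)]
              rw [show (a + 2 + 2 * (b' + 1) + c : Nat) = a + 2 * (b' + 1 + 1) + c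
                from by omega]
          | zero =>
              rw [show (List.replicate 0 '0' ++ List.replicate c '1'
                    ++ List.replicate d '2' : List Char)
                  = List.replicate c '1' ++ List.replicate d '2' from by simp]
              cases c with
              | succ c' =>
                  rw [show (List.replicate (c' + 1) '1' ++ List.replicate d '2' : List Char)
                      = '1' :: (List.replicate c' '1' ++ List.replicate d '2')
                      from by simp [List.replicate_succ]]
                  cases c' with
                  | succ c'' =>
                      rw [show (List.replicate (c'' + 1) '1' ++ List.replicate d '2' : List Char)
                          = '1' :: (List.replicate c'' '1' ++ List.replicate d '2')
                          from by simp [List.replicate_succ]]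
                      rw [body0_1_1 _ _ hu (gt_nmem_append (nm1 c'') (nm2 d))]
                      rw [show (List.replicate a '2' ++ ['2', '2', '2'] : List Char)
                          = List.replicate (a + 3) '2' from by simp [List.replicate_succ']]
                      rw [show ('1' :: (List.replicate c'' '1' ++ List.replicate d '2') : List Char)
                          = List.replicate (c'' + 1) '1' ++ List.replicate d '2'
                          from by simp [List.replicate_succ]]
                      rw [loopA_phase2 (c'' + 1) (a + 3) d fu (by omega)]
                      rw [show (a + 3 + (c'' + 1) : Nat) = a + 2 * (0 + 1) + (c'' + 1 + 1)
                        from by omega]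
                  | zero =>
                      rw [show (List.replicate 0 '1' ++ List.replicate d '2' : List Char)
                          = List.replicate d '2' from by simp]
                      cases d with
                      | zero =>
                          rw [show (List.replicate 0 '2' : List Char) = [] from rfl]
                          rw [body0_1_nil _ hu]
                          have h2 : (List.replicate a '2' ++ ['2', '2', '2'] : List Char)
                              ++ '>' :: [] = (List.replicate a '2' ++ ['2', '2', '2']) ++ ['>'] := rfl
                          rw [h2, loopA_end fu _ (gt_nmem_append hu (by decide))]
                          rw [show (a + 2 * (0 + 1) + (0 + 1) : Nat) = a + 3 from by omega]
                          simp [show (a + 3 : Nat) = a + 1 + 1 + 1 from by omega,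
                            List.replicate_succ']
                      | succ d' =>
                          rw [show (List.replicate (d' + 1) '2' : List Char)
                              = '2' :: List.replicate d' '2' from by simp [List.replicate_succ]]
                          rw [body0_1_2 _ _ hu (nm2 d')]
                          rw [show (List.replicate a '2' ++ ['2', '2', '2', '1'] : List Char)
                              = List.replicate (a + 3) '2' ++ List.replicate 1 '1'
                              from by simp [List.replicate_succ']]
                          rw [loopA_phase3 d' (a + 3) 1 fu (by omega)]
                          rw [show (1 + d' : Nat) = d' + 1 from by omega,
                            show (a + 2 * (0 + 1) + (0 + 1) : Nat) = a + 3 from by omega]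
              | zero =>
                  rw [show (List.replicate 0 '1' ++ List.replicate d '2' : List Char)
                      = List.replicate d '2' from by simp]
                  cases d with
                  | zero =>
                      rw [show (List.replicate 0 '2' : List Char) = [] from rfl]
                      rw [body0_nil _ hu]
                      have h2 : (List.replicate a '2' ++ ['2', '2'] : List Char)
                          ++ '>' :: [] = (List.replicate a '2' ++ ['2', '2']) ++ ['>'] := rfl
                      rw [h2, loopA_end fu _ (gt_nmem_append hu (by decide))]
                      rw [show (a + 2 * (0 + 1) + 0 : Nat) = a + 2 from by omega]
                      simp [show (a + 2 : Nat) = a + 1 + 1 from by omega, List.replicate_succ']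
                  | succ d' =>
                      rw [show (List.replicate (d' + 1) '2' : List Char)
                          = '2' :: List.replicate d' '2' from by simp [List.replicate_succ]]
                      rw [body0_2 _ _ hu (nm2 d')]
                      rw [show (List.replicate a '2' ++ ['2', '2', '1'] : List Char)
                          = List.replicate (a + 2) '2' ++ List.replicate 1 '1'
                          from by simp [List.replicate_succ']]
                      rw [loopA_phase3 d' (a + 2) 1 fu (by omega)]
                      rw [show (1 + d' : Nat) = d' + 1 from by omega,
                        show (a + 2 * (0 + 1) + 0 : Nat) = a + 2 from by omega]

-- full replace of the single-char pattern '>' by '' is a filter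
theorem replace_go_filter : ∀ (fuel : Nat) (l acc : List Char), l.length ≤ fuel →
    PySem.Chars.replace.go ['>'] [] fuel l acc
      = acc.reverse ++ l.filter (fun c => !(c == '>')) := by
  intro fuel
  induction fuel with
  | zero =>
      intro l acc hl
      have : l = [] := List.eq_nil_of_length_eq_zero (by omega)
      subst this
      simp [PySem.Chars.replace.go]
  | succ fu ih =>
      intro l acc hl
      cases l with
      | nil => simp [PySem.Chars.replace.go]
      | cons c t =>
          by_cases hc : c = '>'
          · subst hc
            have hpref : (['>'] : List Char).isPrefixOf ('>' :: t) = true := by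
              simp [List.isPrefixOf]
            simp only [PySem.Chars.replace.go, hpref, if_true]
            rw [show List.drop (['>'] : List Char).length ('>' :: t) = t from rfl]
            rw [show (([] : List Char).reverse ++ acc) = acc from by simp]
            rw [ih t acc (by simpa using Nat.le_of_succ_le_succ hl)]
            simp
          · have hpref : (['>'] : List Char).isPrefixOf (c :: t) = false := by
              have : ¬ ('>' = c) := fun h => hc h.symm
              simp [List.isPrefixOf, this]
            simp only [PySem.Chars.replace.go, hpref, Bool.false_eq_true, if_false]
            rw [ih t (c :: acc) (by simpa using Nat.le_of_succ_le_succ hl)]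
            simp [hc]

theorem replace_strip (l : List Char) :
    PySem.Chars.replace l ['>'] [] = l.filter (fun c => !(c == '>')) := by
  unfold PySem.Chars.replace
  rw [if_neg (by simp)]
  exact replace_go_filter l.length l [] le_rfl

-- ===== VERDICT (by name: the statement is the Claim_ definition above) =====
theorem f_spec : Claim_equal_f := by
  intro k _
  unfold Spec_f
  show String.mk (PySem.Chars.replace
      (loopA (k.toNat + 46)
        (['>'] ++ List.replicate 15 '0' ++ List.replicate k.toNat '1' ++ List.replicate 15 '2'))
      ['>'] []) = f_alt k
  have hinit : (['>'] ++ List.replicate 15 '0' ++ List.replicate k.toNat '1'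
        ++ List.replicate 15 '2' : List Char)
      = List.replicate 0 '2' ++ '>' ::
        (List.replicate 15 '0' ++ List.replicate k.toNat '1' ++ List.replicate 15 '2') := by
    simp
  rw [hinit, loopA_phase1 15 0 k.toNat 15 (k.toNat + 46) (by omega), replace_strip]
  unfold f_alt
  have hmax : (30 + max k 0).toNat = 30 + k.toNat := by
    rcases le_total k 0 with h | h
    · rw [max_eq_right h]; omega
    · rw [max_eq_left h]; omega
  rw [hmax]
  congr 1
  simp only [List.filter_append]
  have hf2 : (List.replicate (0 + 2 * 15 + k.toNat) '2').filter (fun c => !(c == '>'))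
      = List.replicate (0 + 2 * 15 + k.toNat) '2' := by
    rw [List.filter_eq_self]; intro a ha
    rw [List.eq_of_mem_replicate ha]; decide
  have hf1 : (List.replicate 15 '1').filter (fun c => !(c == '>'))
      = List.replicate 15 '1' := by decide
  have hfg : (['>'] : List Char).filter (fun c => !(c == '>')) = [] := by decide
  rw [hf2, hf1, hfg, List.append_nil]
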